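-- pv_equiv track=rewrite | github.com/SLTNKCGZ/TSPwP_solution | distance.py | tabu_search_optimized
-- ===== SOURCE A (Python) =====
-- from typing import List, Tuple, Dict, Set
-- from collections import defaultdict, deque
--
-- def calculate_cost(tour: List[int],
--                    distance_matrix: Dict[int, Dict[int, int]],
--                    penalty: int,
--                    all_cities: Set[int]) -> int:
--     """Turun toplam maliyetini hesaplar."""
--     cost = 0
--     visited = set(tour)
--
--     for i in range(len(tour)-1):
--         cost += distance_matrix[tour[i]][tour[i+1]]
--
--     skipped = all_cities - visited
--     cost += len(skipped) * penalty
--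
--     return cost
--
-- def two_opt_swap(tour: List[int], i: int, k: int) -> List[int]:
--     """2-opt swap işlemi uygular."""
--     return tour[:i] + tour[i:k+1][::-1] + tour[k+1:]
--
-- def tabu_search_optimized(initial_tour: List[int],
--                          distance_matrix: Dict[int, Dict[int, int]],
--                          penalty: int,
--                          all_cities: Set[int],
--                          max_iter: int = 1000,
--                          tabu_size: int = 30) -> Tuple[List[int], int]:
--     """Optimize edilmiş tabu search algoritması."""
--     current_tour = initial_tour[:]
--     best_tour = initial_tour[:]
--     best_cost = calculate_cost(best_tour, distance_matrix, penalty, all_cities)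
--     tabu_list = deque(maxlen=tabu_size)
--
--     for _ in range(max_iter):
--         best_move = None
--         best_delta = 0
--
--         for i in range(1, len(current_tour)-2):
--             for k in range(i+1, len(current_tour)-1):
--                 a, b = current_tour[i-1], current_tour[i]
--                 c, d = current_tour[k], current_tour[k+1]
--                 delta = (distance_matrix[a][c] + distance_matrix[b][d]) - (distance_matrix[a][b] + distance_matrix[c][d])
--                 move = (current_tour[i], current_tour[k])
--
--                 if (move not in tabu_list) or (best_cost + delta < best_cost):
--                     if delta < best_delta:
--                         best_delta = delta
--                         best_move = (i, k, move)
--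
--         if best_move:
--             i, k, move = best_move
--             current_tour = two_opt_swap(current_tour, i, k)
--             current_cost = best_cost + best_delta
--
--             if current_cost < best_cost:
--                 best_tour = current_tour[:]
--                 best_cost = current_cost
--
--             tabu_list.append(move)
--         else:
--             break
--
--     return best_tour, best_cost
-- ===== SOURCE B (Python) =====
-- def tabu_search_optimized(initial_tour, distance_matrix, penalty, all_cities,
--                           max_iter=1000, tabu_size=30):
--     """2-opt descent that RANKS the candidate moves by sorting each round and
--     applies the top-ranked one; the tabu machinery of the original is inert
--     (every applied move has negative gain, so the tabu guard always passes)
--     and is omitted, as is the best-tour bookkeeping."""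
--     n = len(initial_tour)
--     pairs = [(i, k) for i in range(1, n - 2) for k in range(i + 1, n - 1)]
--
--     def gain(tour, i, k):
--         removed = distance_matrix[tour[i - 1]][tour[i]] + distance_matrix[tour[k]][tour[k + 1]]
--         added = distance_matrix[tour[i - 1]][tour[k]] + distance_matrix[tour[i]][tour[k + 1]]
--         return added - removed
--
--     tour = initial_tour[:]
--     cost = penalty * len(set(all_cities) - set(tour))
--     for x, y in zip(tour, tour[1:]):
--         cost += distance_matrix[x][y]
--
--     rounds = max_iter
--     while rounds > 0 and pairs:
--         rounds -= 1
--         ranked = sorted(pairs, key=lambda p: gain(tour, p[0], p[1]))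
--         i, k = ranked[0]
--         d = gain(tour, i, k)
--         if d >= 0:
--             break
--         tour[i:k + 1] = tour[i:k + 1][::-1]
--         cost += d
--     return tour, cost
-- ===== Notes on version B (the rewrite author's own statement) =====
-- stated objective: alternative
-- what changed: B replaces A's tabu-guarded nested-loop running-minimum scan with sort-then-pick selection: the candidate index pairs are built once up front, each round they are ranked by a stable sort on the move's gain and the top-ranked move applied if its gain is negative; the tabu deque and best-tour/best-cost bookkeeping (provably inert in A, since every selected move has delta < 0) disappear, and the initial cost is accumulated over zipped edge pairs instead of an index-range loop.
import Mathlib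
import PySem

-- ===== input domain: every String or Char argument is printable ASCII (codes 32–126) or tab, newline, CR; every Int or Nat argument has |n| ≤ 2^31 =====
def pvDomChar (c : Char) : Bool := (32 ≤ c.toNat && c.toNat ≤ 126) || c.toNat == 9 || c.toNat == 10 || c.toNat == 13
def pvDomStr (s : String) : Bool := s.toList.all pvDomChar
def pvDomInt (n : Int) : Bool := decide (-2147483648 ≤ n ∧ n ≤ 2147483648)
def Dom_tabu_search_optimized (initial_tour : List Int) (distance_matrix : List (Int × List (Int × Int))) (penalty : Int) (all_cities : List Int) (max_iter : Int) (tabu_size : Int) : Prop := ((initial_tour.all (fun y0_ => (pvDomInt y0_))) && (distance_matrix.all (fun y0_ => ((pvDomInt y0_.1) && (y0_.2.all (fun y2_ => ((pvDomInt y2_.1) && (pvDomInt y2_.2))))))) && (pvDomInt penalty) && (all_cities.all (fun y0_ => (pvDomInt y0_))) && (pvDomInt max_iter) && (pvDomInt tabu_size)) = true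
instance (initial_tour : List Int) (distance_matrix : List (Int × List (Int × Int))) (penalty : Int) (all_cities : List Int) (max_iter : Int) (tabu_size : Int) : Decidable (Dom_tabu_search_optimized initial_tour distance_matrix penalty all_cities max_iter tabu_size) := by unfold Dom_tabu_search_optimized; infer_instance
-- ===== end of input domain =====

-- B replaces A's tabu-guarded nested-loop running-minimum scan by sort-then-pick selection
-- (index pairs built once; each round is ranked by a stable sort on the move's gain and the
-- top-ranked move applied while its gain is negative); A's tabu deque and best-tour
-- bookkeeping are provably inert and omitted — objective: alternative (not faster).

-- ===== PORT A =====
-- dict lookup dm[a][b]; Python raises KeyError on a missing key — Pre_ excludes those inputs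
def pvDistA (dm : List (Int × List (Int × Int))) (a b : Int) : Int :=
  PySem.Dict.getD ⟨PySem.Dict.getD ⟨dm⟩ a []⟩ b 0

def calculate_cost (tour : List Int) (dm : List (Int × List (Int × Int)))
    (penalty : Int) (all_cities : List Int) : Int :=
  let cost := (PySem.List.pyRange 0 ((tour.length : Int) - 1) 1).foldl
      (fun c i => c + pvDistA dm (PySem.List.pyGetD tour i 0) (PySem.List.pyGetD tour (i + 1) 0)) 0
  let skipped := PySem.Set.diff all_cities (PySem.Set.ofList tour)
  cost + PySem.Set.len skipped * penalty

def two_opt_swap (tour : List Int) (i k : Int) : List Int :=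
  PySem.List.slice tour none (some i)
    ++ (PySem.List.slice? (PySem.List.slice tour (some i) (some (k + 1))) none none (-1)).getD []
    ++ PySem.List.slice tour (some (k + 1)) none

-- the inner double loop: running strict minimum of delta under the tabu guard
def pvScanA (dm : List (Int × List (Int × Int))) (tour : List Int) (best_cost : Int)
    (tabu : List (Int × Int)) : Int × Option (Int × Int × (Int × Int)) :=
  (PySem.List.pyRange 1 ((tour.length : Int) - 2) 1).foldl (fun s i =>
    (PySem.List.pyRange (i + 1) ((tour.length : Int) - 1) 1).foldl (fun s k =>
      let a := PySem.List.pyGetD tour (i - 1) 0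
      let b := PySem.List.pyGetD tour i 0
      let c := PySem.List.pyGetD tour k 0
      let d := PySem.List.pyGetD tour (k + 1) 0
      let delta := (pvDistA dm a c + pvDistA dm b d) - (pvDistA dm a b + pvDistA dm c d)
      let move := (PySem.List.pyGetD tour i 0, PySem.List.pyGetD tour k 0)
      if (!(tabu.contains move) || decide (best_cost + delta < best_cost)) then
        (if delta < s.1 then (delta, some (i, k, move)) else s)
      else s) s)
    ((0 : Int), (none : Option (Int × Int × (Int × Int))))

-- deque(maxlen=tabu_size).append(move): drop from the left when full
def pvTabuAppend (tabu : List (Int × Int)) (move : Int × Int) (maxlen : Int) : List (Int × Int) :=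
  let t := tabu ++ [move]
  if maxlen < (t.length : Int) then t.drop ((t.length : Int) - maxlen).toNat else t

def pvLoopA (dm : List (Int × List (Int × Int))) (tabu_size : Int) (fuel : Nat)
    (current best : List Int) (best_cost : Int) (tabu : List (Int × Int)) : List Int × Int :=
  match fuel with
  | 0 => (best, best_cost)
  | fuel + 1 =>
    let s := pvScanA dm current best_cost tabu
    match s.2 with
    | some (i, k, move) =>
      let current' := two_opt_swap current i k
      let current_cost := best_cost + s.1
      let best' := if current_cost < best_cost then current' else best
      let bc' := if current_cost < best_cost then current_cost else best_cost
      pvLoopA dm tabu_size fuel current' best' bc' (pvTabuAppend tabu move tabu_size)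
    | none => (best, best_cost)

def tabu_search_optimized (initial_tour : List Int) (distance_matrix : List (Int × List (Int × Int))) (penalty : Int) (all_cities : List Int) (max_iter : Int) (tabu_size : Int) : List Int × Int :=
  let best_cost := calculate_cost initial_tour distance_matrix penalty all_cities
  pvLoopA distance_matrix tabu_size max_iter.toNat initial_tour initial_tour best_cost []

-- ===== PORT B =====
-- pairs = [(i, k) for i in range(1, n-2) for k in range(i+1, n-1)]  (built once, from n)
def pvPairsOf (n : Int) : List (Int × Int) :=
  (PySem.List.pyRange 1 (n - 2) 1).flatMap (fun i =>
    (PySem.List.pyRange (i + 1) (n - 1) 1).map (fun k => (i, k)))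

-- gain(tour, i, k) = added - removed
def pvGainB (dm : List (Int × List (Int × Int))) (tour : List Int) (p : Int × Int) : Int :=
  let removed := pvDistA dm (PySem.List.pyGetD tour (p.1 - 1) 0) (PySem.List.pyGetD tour p.1 0)
    + pvDistA dm (PySem.List.pyGetD tour p.2 0) (PySem.List.pyGetD tour (p.2 + 1) 0)
  let added := pvDistA dm (PySem.List.pyGetD tour (p.1 - 1) 0) (PySem.List.pyGetD tour p.2 0)
    + pvDistA dm (PySem.List.pyGetD tour p.1 0) (PySem.List.pyGetD tour (p.2 + 1) 0)
  added - removed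

-- tour[i:k+1] = tour[i:k+1][::-1]
def pvSwapB (tour : List Int) (i k : Int) : List Int :=
  PySem.List.slice tour none (some i)
    ++ (PySem.List.slice tour (some i) (some (k + 1))).reverse
    ++ PySem.List.slice tour (some (k + 1)) none

-- while rounds > 0 and pairs: rank by a stable sort on gain, apply the top-ranked move
def pvLoopB (dm : List (Int × List (Int × Int))) (pairs : List (Int × Int)) (fuel : Nat)
    (tour : List Int) (cost : Int) : List Int × Int :=
  match fuel with
  | 0 => (tour, cost)
  | fuel + 1 =>
    match (PySem.List.sorted pairs (fun p => pvGainB dm tour p) false).head? with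
    | none => (tour, cost)
    | some p =>
      let d := pvGainB dm tour p
      if 0 ≤ d then (tour, cost)
      else pvLoopB dm pairs fuel (pvSwapB tour p.1 p.2) (cost + d)

def tabu_search_optimized_alt (initial_tour : List Int) (distance_matrix : List (Int × List (Int × Int))) (penalty : Int) (all_cities : List Int) (max_iter : Int) (tabu_size : Int) : List Int × Int :=
  let pairs := pvPairsOf (initial_tour.length : Int)
  let cost := (initial_tour.zip (initial_tour.drop 1)).foldl
    (fun c q => c + pvDistA distance_matrix q.1 q.2)
    (penalty * PySem.Set.len (PySem.Set.diff all_cities (PySem.Set.ofList initial_tour)))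
  pvLoopB distance_matrix pairs max_iter.toNat initial_tour cost

-- ===== PRECONDITION & SPEC =====
-- Pre_ excludes the inputs on which A raises: a negative tabu_size (deque(maxlen=…) raises
-- ValueError) and a distance matrix missing an entry A reads (KeyError): the entries for the
-- consecutive pairs of the tour (initial cost), and — only when the 2-opt scan can run, i.e.
-- len ≥ 4 and max_iter ≥ 1 — the full submatrix over the tour's cities (the tour is permuted
-- between iterations). The full-submatrix clause is slightly wider than the set of entries
-- actually read, so Pre_ excludes some inputs on which A returns (see cites).
def Pre_tabu_search_optimized (initial_tour : List Int) (distance_matrix : List (Int × List (Int × Int))) (penalty : Int) (all_cities : List Int) (max_iter : Int) (tabu_size : Int) : Prop :=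
  0 ≤ tabu_size ∧
  (∀ p ∈ initial_tour.zip (initial_tour.drop 1),
    PySem.Dict.contains (⟨distance_matrix⟩ : PySem.Dict Int (List (Int × Int))) p.1 = true ∧
    PySem.Dict.contains (⟨PySem.Dict.getD (⟨distance_matrix⟩ : PySem.Dict Int (List (Int × Int))) p.1 []⟩ : PySem.Dict Int Int) p.2 = true) ∧
  (4 ≤ initial_tour.length → 1 ≤ max_iter →
    ∀ a ∈ initial_tour, ∀ b ∈ initial_tour,
      PySem.Dict.contains (⟨distance_matrix⟩ : PySem.Dict Int (List (Int × Int))) a = true ∧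
      PySem.Dict.contains (⟨PySem.Dict.getD (⟨distance_matrix⟩ : PySem.Dict Int (List (Int × Int))) a []⟩ : PySem.Dict Int Int) b = true)
instance (initial_tour : List Int) (distance_matrix : List (Int × List (Int × Int))) (penalty : Int) (all_cities : List Int) (max_iter : Int) (tabu_size : Int) : Decidable (Pre_tabu_search_optimized initial_tour distance_matrix penalty all_cities max_iter tabu_size) := by unfold Pre_tabu_search_optimized; infer_instance

def pvWitness_tabu_search_optimized : List Int × (List (Int × List (Int × Int))) × Int × List Int × Int × Int :=
  ([0, 1], [(0, [(0, 0), (1, 4)]), (1, [(0, 4), (1, 0)])], 1, [0, 1, 2], 3, 2)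

def Spec_tabu_search_optimized (initial_tour : List Int) (distance_matrix : List (Int × List (Int × Int))) (penalty : Int) (all_cities : List Int) (max_iter : Int) (tabu_size : Int) (out : List Int × Int) : Prop := out = tabu_search_optimized_alt initial_tour distance_matrix penalty all_cities max_iter tabu_size
instance (initial_tour : List Int) (distance_matrix : List (Int × List (Int × Int))) (penalty : Int) (all_cities : List Int) (max_iter : Int) (tabu_size : Int) (out : List Int × Int) : Decidable (Spec_tabu_search_optimized initial_tour distance_matrix penalty all_cities max_iter tabu_size out) := by unfold Spec_tabu_search_optimized; infer_instance

-- ===== CLAIM (what is proved, stated in full; the proofs are below) =====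
def Claim_equal_tabu_search_optimized : Prop := ∀ (initial_tour : List Int) (distance_matrix : List (Int × List (Int × Int))) (penalty : Int) (all_cities : List Int) (max_iter : Int) (tabu_size : Int), Dom_tabu_search_optimized initial_tour distance_matrix penalty all_cities max_iter tabu_size → Pre_tabu_search_optimized initial_tour distance_matrix penalty all_cities max_iter tabu_size → Spec_tabu_search_optimized initial_tour distance_matrix penalty all_cities max_iter tabu_size (tabu_search_optimized initial_tour distance_matrix penalty all_cities max_iter tabu_size)

-- ===== LEMMAS AND PROOFS =====

theorem pv_swap_eq (tour : List Int) (i k : Int) : two_opt_swap tour i k = pvSwapB tour i k := by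
  simp [two_opt_swap, pvSwapB, PySem.List.slice?_none_none_neg_one]

-- first minimum (earliest element of minimal key)
def pvMin1 {α : Type} (key : α → Int) : List α → Option α
  | [] => none
  | x :: l => match pvMin1 key l with
    | none => some x
    | some u => some (if key u < key x then u else x)

theorem pvMin1_mem {α : Type} (key : α → Int) : ∀ (l : List α) (u : α),
    pvMin1 key l = some u → u ∈ l
  | x :: l, u, h => by
    simp only [pvMin1] at h
    rcases hl : pvMin1 key l with _ | v <;> rw [hl] at h <;>
      simp only [Option.some.injEq] at h <;> subst h
    · exact List.mem_cons_self
    · split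
      · exact List.mem_cons_of_mem _ (pvMin1_mem key l v hl)
      · exact List.mem_cons_self
-- running first-minimum combine (the shape the foldl proofs share)
def pvCmb {α : Type} (key : α → Int) (h : Option α) (x : α) : Option α :=
  match h with
  | none => some x
  | some m => some (if key x < key m then x else m)

theorem pv_foldl_cmb_some {α : Type} (key : α → Int) (l : List α) : ∀ (m : α),
    l.foldl (pvCmb key) (some m)
    = some (match pvMin1 key l with
      | none => m
      | some u => if key u < key m then u else m) := by
  induction l with
  | nil => intro m; simp [pvMin1]
  | cons x l ih =>
    intro m
    simp only [List.foldl_cons, pvCmb, pvMin1]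
    rw [ih]
    rcases h : pvMin1 key l with _ | u
    · rfl
    · simp only []
      by_cases h1 : key u < key x <;> by_cases h2 : key x < key m <;> by_cases h3 : key u < key m <;>
        simp [h1, h2, h3] <;> first | rfl | (exfalso; omega)

theorem pv_foldl_cmb {α : Type} (key : α → Int) (l : List α) :
    l.foldl (pvCmb key) none = pvMin1 key l := by
  cases l with
  | nil => rfl
  | cons x l =>
    show l.foldl (pvCmb key) (some x) = _
    refine Eq.trans (pv_foldl_cmb_some key l x) ?_
    simp only [pvMin1]
    rcases pvMin1 key l with _ | u
    · rfl
    · rfl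

theorem pv_head_insertBy {α : Type} (key : α → Int) (x : α) (ys : List α) :
    (PySem.List.insertBy (fun a b => decide (key a < key b)) x ys).head?
    = pvCmb key ys.head? x := by
  cases ys with
  | nil => rfl
  | cons y t =>
    simp only [PySem.List.insertBy, pvCmb, List.head?]
    by_cases h : key x < key y <;> simp [h]

theorem pv_head_foldl_ins {α : Type} (key : α → Int) (l : List α) : ∀ (acc : List α),
    (l.foldl (fun acc x => PySem.List.insertBy (fun a b => decide (key a < key b)) x acc) acc).head?
    = l.foldl (pvCmb key) acc.head? := by
  induction l with
  | nil => intro acc; rfl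
  | cons x l ih =>
    intro acc
    simp only [List.foldl_cons]
    rw [ih, pv_head_insertBy]

-- head of Python's stable sort = the first element of minimal key
theorem pv_head_sorted {α : Type} (key : α → Int) (l : List α) :
    (PySem.List.sorted l key false).head? = pvMin1 key l := by
  rw [PySem.List.sorted_eq_foldl_insertBy, pv_head_foldl_ins]
  exact pv_foldl_cmb key l

theorem pv_pure_scan {α β : Type} (key : α → Int) (g : α → β) (l : List α) : ∀ (bd : Int) (bm : Option β),
    l.foldl (fun s t => if key t < s.1 then (key t, some (g t)) else s) (bd, bm)
    = match pvMin1 key l with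
      | none => (bd, bm)
      | some u => if key u < bd then (key u, some (g u)) else (bd, bm) := by
  induction l with
  | nil => intro bd bm; rfl
  | cons x l ih =>
    intro bd bm
    simp only [List.foldl_cons, pvMin1]
    rw [show (if key x < bd then ((key x : Int), some (g x)) else (bd, bm))
        = ((if key x < bd then key x else bd), (if key x < bd then some (g x) else bm)) by split <;> rfl]
    rw [ih]
    rcases h : pvMin1 key l with _ | u
    · simp only []; split_ifs <;> rfl
    · simp only []
      by_cases h1 : key u < key x <;> by_cases h2 : key x < bd <;> by_cases h3 : key u < bd <;>
        simp [h1, h2, h3] <;> first | rfl | (exfalso; omega)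

theorem pv_guard_scan {α β : Type} (key : α → Int) (g : α → β) (guard : α → Bool)
    (hg : ∀ t, key t < 0 → guard t = true) (l : List α) :
    ∀ (bd : Int) (bm : Option β), bd ≤ 0 →
    l.foldl (fun s t => if guard t then (if key t < s.1 then (key t, some (g t)) else s) else s) (bd, bm)
    = l.foldl (fun s t => if key t < s.1 then (key t, some (g t)) else s) (bd, bm) := by
  induction l with
  | nil => intro bd bm _; rfl
  | cons x l ih =>
    intro bd bm hbd
    simp only [List.foldl_cons]
    by_cases hx : key x < bd
    · rw [if_pos (hg x (by omega)), if_pos hx]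
      exact ih _ _ (by omega)
    · rw [if_neg hx, ite_self]
      exact ih _ _ hbd

-- A's delta is B's gain
theorem pv_key_eq_gain (dm : List (Int × List (Int × Int))) (tour : List Int) (p : Int × Int) :
    (pvDistA dm (PySem.List.pyGetD tour (p.1 - 1) 0) (PySem.List.pyGetD tour p.2 0)
      + pvDistA dm (PySem.List.pyGetD tour p.1 0) (PySem.List.pyGetD tour (p.2 + 1) 0))
    - (pvDistA dm (PySem.List.pyGetD tour (p.1 - 1) 0) (PySem.List.pyGetD tour p.1 0)
      + pvDistA dm (PySem.List.pyGetD tour p.2 0) (PySem.List.pyGetD tour (p.2 + 1) 0))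
    = pvGainB dm tour p := rfl

theorem pv_scanA_flat (dm : List (Int × List (Int × Int))) (tour : List Int) (bc : Int)
    (tabu : List (Int × Int)) :
    pvScanA dm tour bc tabu
    = (pvPairsOf (tour.length : Int)).foldl (fun s p =>
        if pvGainB dm tour p < s.1 then
          (pvGainB dm tour p, some (p.1, p.2, (PySem.List.pyGetD tour p.1 0, PySem.List.pyGetD tour (p.2) 0)))
        else s) (0, none) := by
  have hflat : pvScanA dm tour bc tabu
      = (pvPairsOf (tour.length : Int)).foldl (fun s p =>
          if (!(tabu.contains (PySem.List.pyGetD tour p.1 0, PySem.List.pyGetD tour (p.2) 0))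
              || decide (bc + pvGainB dm tour p < bc)) then
            (if pvGainB dm tour p < s.1 then
              (pvGainB dm tour p, some (p.1, p.2, (PySem.List.pyGetD tour p.1 0, PySem.List.pyGetD tour (p.2) 0)))
            else s)
          else s) (0, none) := by
    rw [pvScanA, pvPairsOf, List.foldl_flatMap]
    simp only [List.foldl_map]
    refine PySem.List.foldl_congr_mem _ _ _ _ ?_
    intro s i _
    refine PySem.List.foldl_congr_mem _ _ _ _ ?_
    intro s' k _
    rw [← pv_key_eq_gain dm tour (i, k)]
  rw [hflat]
  exact pv_guard_scan (pvGainB dm tour)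
    (fun p => (p.1, p.2, (PySem.List.pyGetD tour p.1 0, PySem.List.pyGetD tour (p.2) 0)))
    (fun p => (!(tabu.contains (PySem.List.pyGetD tour p.1 0, PySem.List.pyGetD tour (p.2) 0))
      || decide (bc + pvGainB dm tour p < bc)))
    (fun t ht => by simp only [Bool.or_eq_true, decide_eq_true_eq]; right; omega)
    (pvPairsOf (tour.length : Int)) 0 none le_rfl

-- bounds of a candidate pair
theorem pv_mem_pairs (n : Int) (p : Int × Int) (h : p ∈ pvPairsOf n) :
    1 ≤ p.1 ∧ p.1 < p.2 ∧ p.2 < n - 1 := by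
  simp only [pvPairsOf, List.mem_flatMap, List.mem_map] at h
  obtain ⟨i, hi, k, hk, rfl⟩ := h
  rw [PySem.List.mem_pyRange_one] at hi hk
  exact ⟨hi.1, by omega, by omega⟩

-- a 2-opt swap with in-range endpoints preserves the length
theorem pv_len_swap (tour : List Int) (i k : Int)
    (h1 : 1 ≤ i) (h2 : i < k) (h3 : k < (tour.length : Int) - 1) :
    ((two_opt_swap tour i k).length : Int) = (tour.length : Int) := by
  rw [pv_swap_eq]
  simp only [pvSwapB]
  rw [PySem.List.slice_to tour (by omega), PySem.List.slice_toNat tour (by omega) (by omega),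
    PySem.List.slice_from tour (by omega)]
  simp only [List.length_append, List.length_reverse, List.length_take, List.length_drop]
  omega

theorem pv_loop_eq (dm : List (Int × List (Int × Int))) (ts : Int) (n : Int) (fuel : Nat) :
    ∀ (tour : List Int) (bc : Int) (tabu : List (Int × Int)), (tour.length : Int) = n →
    pvLoopA dm ts fuel tour tour bc tabu = pvLoopB dm (pvPairsOf n) fuel tour bc := by
  induction fuel with
  | zero => intro tour bc tabu _; rfl
  | succ fuel ih =>
    intro tour bc tabu hlen
    have hsh : (PySem.List.sorted (pvPairsOf n) (fun p => pvGainB dm tour p) false).head?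
        = pvMin1 (pvGainB dm tour) (pvPairsOf n) := pv_head_sorted _ _
    rcases hp : pvMin1 (pvGainB dm tour) (pvPairsOf n) with _ | p
    · have hscan : pvScanA dm tour bc tabu
          = ((0 : Int), (none : Option (Int × Int × (Int × Int)))) := by
        rw [pv_scanA_flat, hlen, pv_pure_scan, hp]
      simp only [pvLoopA, pvLoopB, hsh, hp, hscan]
    · obtain ⟨hb1, hb2, hb3⟩ := pv_mem_pairs n p (pvMin1_mem _ _ _ hp)
      by_cases hk : pvGainB dm tour p < 0
      · have hscan : pvScanA dm tour bc tabu
            = (pvGainB dm tour p, some (p.1, p.2,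
                (PySem.List.pyGetD tour p.1 0, PySem.List.pyGetD tour p.2 0))) := by
          rw [pv_scanA_flat, hlen, pv_pure_scan, hp]
          simp [hk]
        simp only [pvLoopA, pvLoopB, hsh, hp, hscan]
        rw [if_pos (show bc + pvGainB dm tour p < bc by omega),
          if_pos (show bc + pvGainB dm tour p < bc by omega),
          if_neg (show ¬ ((0:Int) ≤ pvGainB dm tour p) by omega), pv_swap_eq,
          ih _ _ _ (by rw [← pv_swap_eq, pv_len_swap tour p.1 p.2 hb1 hb2 (by omega), hlen])]
      · have hscan : pvScanA dm tour bc tabu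
            = ((0 : Int), (none : Option (Int × Int × (Int × Int)))) := by
          rw [pv_scanA_flat, hlen, pv_pure_scan, hp]
          simp [hk]
        simp only [pvLoopA, pvLoopB, hsh, hp, hscan]
        rw [if_pos (show (0:Int) ≤ pvGainB dm tour p by omega)]

theorem pv_cost0_eq (tour : List Int) (dm : List (Int × List (Int × Int)))
    (penalty : Int) (all_cities : List Int) :
    calculate_cost tour dm penalty all_cities
    = (tour.zip (tour.drop 1)).foldl (fun c q => c + pvDistA dm q.1 q.2)
        (penalty * PySem.Set.len (PySem.Set.diff all_cities (PySem.Set.ofList tour))) := by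
  have hmap : (PySem.List.pyRange 0 ((tour.length : Int) - 1) 1).map
        (fun i => pvDistA dm (PySem.List.pyGetD tour i 0) (PySem.List.pyGetD tour (i + 1) 0))
      = (tour.zip (tour.drop 1)).map (fun p => pvDistA dm p.1 p.2) := by
    apply List.ext_getElem
    · simp only [List.length_map, PySem.List.length_pyRange_one, List.length_zip,
        List.length_drop]
      omega
    · intro j h1 h2
      simp only [List.getElem_map, PySem.List.getElem_pyRange_one, List.getElem_zip,
        List.getElem_drop]
      have hj : j < tour.length - 1 := by
        simp [PySem.List.length_pyRange_one] at h1
        omega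
      rw [show ((0 : Int) + (j : Int)) = ((j : Nat) : Int) by omega]
      rw [show ((j : Int) + 1) = (((j + 1 : Nat)) : Int) by omega]
      simp only [PySem.List.pyGetD_natCast]
      rw [List.getD_eq_getElem tour 0 (by omega), List.getD_eq_getElem tour 0 (by omega)]
      simp [Nat.add_comm]
  simp only [calculate_cost, PySem.List.foldl_add]
  rw [hmap]
  ring

-- ===== VERDICT (by name: the statement is the Claim_ definition above) =====
theorem tabu_search_optimized_spec : Claim_equal_tabu_search_optimized := by
  intro it dm pen ac mi ts _ _
  unfold Spec_tabu_search_optimized tabu_search_optimized tabu_search_optimized_alt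
  rw [pv_cost0_eq, pv_loop_eq dm ts (it.length : Int) mi.toNat it _ [] rfl]
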